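-- pv_equiv track=rewrite | github.com/Ez10e6/SchASPLM-Shamantics | Finetuning/scripts/data_converter_maximize_data.py | parse_asp_to_steps
-- ===== SOURCE A (Python) =====
-- def parse_asp_to_steps(asp_content):
--     lines = asp_content.splitlines()
--     steps = []
--     current_ir = None
--     current_code_buffer = []
--     for line in lines:
--         line = line.strip()
--         if not line: continue
--         if line.startswith('%'):
--             if current_ir is not None:
--                 code_block = "\n".join(current_code_buffer).strip()
--                 if code_block: steps.append((current_ir, code_block))
--             current_ir = line.lstrip('%').strip()
--             current_code_buffer = []
--         else:
--             current_code_buffer.append(line)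
--     if current_ir is not None:
--         code_block = "\n".join(current_code_buffer).strip()
--         if code_block: steps.append((current_ir, code_block))
--     return steps
-- ===== SOURCE B (Python) =====
-- def parse_asp_to_steps(asp_content):
--     # Preprocess once: stripped, non-blank lines; then a recursive descent over
--     # header-led blocks (takeWhile/dropWhile splitting) instead of a fold with a flush.
--     cleaned = [s for s in (l.strip() for l in asp_content.splitlines()) if s]
--
--     def emit(lines):
--         # lines is empty or starts with a header line
--         if not lines:
--             return []
--         header = lines[0].lstrip('%').strip()
--         body = []
--         rest = lines[1:]
--         while rest and not rest[0].startswith('%'):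
--             body.append(rest[0])
--             rest = rest[1:]
--         pair = [(header, "\n".join(body))] if body else []
--         return pair + emit(rest)
--
--     # drop everything before the first header
--     rest = cleaned
--     while rest and not rest[0].startswith('%'):
--         rest = rest[1:]
--     return emit(rest)
-- ===== Notes on version B (the rewrite author's own statement) =====
-- stated objective: alternative
-- what changed: B replaces A's single fold that maintains (current header, code buffer) state and flushes it in place (plus a duplicated final flush) with a stateless recursive descent: one preprocessing pass normalizes the lines, the pre-header prefix is dropped, and a recursion splits the remainder into header-led blocks with takeWhile/dropWhile-style spans, emitting a pair per block with a non-empty body; no accumulator state, no re-strip of the joined block.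
import Mathlib
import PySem

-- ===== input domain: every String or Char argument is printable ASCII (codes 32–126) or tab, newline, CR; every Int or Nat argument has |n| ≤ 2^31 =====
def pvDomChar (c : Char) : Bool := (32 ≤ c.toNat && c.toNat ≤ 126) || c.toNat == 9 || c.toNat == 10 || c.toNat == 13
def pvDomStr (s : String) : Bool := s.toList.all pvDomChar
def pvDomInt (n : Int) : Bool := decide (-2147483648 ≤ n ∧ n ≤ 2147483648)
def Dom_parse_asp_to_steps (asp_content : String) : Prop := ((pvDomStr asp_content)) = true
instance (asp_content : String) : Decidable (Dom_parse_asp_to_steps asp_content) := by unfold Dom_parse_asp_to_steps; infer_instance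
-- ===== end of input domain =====

-- B replaces A's stateful fold-and-flush with a preprocessing pass plus a recursive descent over header-led blocks; same result, same cost.


-- ===== PORT A =====
-- line.lstrip('%').strip(): dropWhile (· == '%') is exact for lstrip with the single strip-char '%'
def pvStripHeader (line : List Char) : List Char :=
  PySem.Chars.strip (line.dropWhile (· == '%'))

-- the flush A performs (both inside the loop and after it): join, strip, append if non-empty
def pvFlushA (steps : List (String × String)) (ir : List Char) (buf : List (List Char)) :
    List (String × String) :=
  let cb := PySem.Chars.strip (PySem.Chars.join ['\n'] buf)
  if cb = [] then steps else steps ++ [(String.ofList ir, String.ofList cb)]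

-- one iteration of A's loop over (steps, current_ir, current_code_buffer)
def pvStepA (st : List (String × String) × Option (List Char) × List (List Char))
    (raw : List Char) : List (String × String) × Option (List Char) × List (List Char) :=
  let line := PySem.Chars.strip raw
  if line = [] then st
  else if PySem.Chars.startswith line ['%'] then
    ((match st.2.1 with
      | none => st.1
      | some ir => pvFlushA st.1 ir st.2.2), some (pvStripHeader line), [])
  else (st.1, st.2.1, st.2.2 ++ [line])

def parse_asp_to_steps (asp_content : String) : List (String × String) :=
  let fin := (PySem.Chars.splitlines asp_content.toList).foldl pvStepA ([], none, [])
  match fin.2.1 with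
  | none => fin.1
  | some ir => pvFlushA fin.1 ir fin.2.2

-- ===== PORT B =====
def pvIsHdr (l : List Char) : Bool := PySem.Chars.startswith l ['%']

-- preprocessing pass: stripped, non-blank lines
def pvCleaned (asp_content : String) : List (List Char) :=
  ((PySem.Chars.splitlines asp_content.toList).map PySem.Chars.strip).filter
    (fun l => !l.isEmpty)

-- recursive descent over header-led blocks; the while loop spanning the body is
-- takeWhile/dropWhile over the tail
def pvEmit : List (List Char) → List (String × String)
  | [] => []
  | h :: rest =>
      let body := rest.takeWhile (fun l => !pvIsHdr l)
      let rest' := rest.dropWhile (fun l => !pvIsHdr l)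
      (if body.isEmpty then []
       else [(String.ofList (pvStripHeader h),
              String.ofList (PySem.Chars.join ['\n'] body))]) ++ pvEmit rest'
  termination_by l => l.length
  decreasing_by
    have := List.length_dropWhile_le (fun l => !pvIsHdr l) rest
    simp only [List.length_cons]; omega

def parse_asp_to_steps_alt (asp_content : String) : List (String × String) :=
  pvEmit ((pvCleaned asp_content).dropWhile (fun l => !pvIsHdr l))

-- ===== PRECONDITION & SPEC =====
def Spec_parse_asp_to_steps (asp_content : String) (out : List (String × String)) : Prop := out = parse_asp_to_steps_alt asp_content
instance (asp_content : String) (out : List (String × String)) : Decidable (Spec_parse_asp_to_steps asp_content out) := by unfold Spec_parse_asp_to_steps; infer_instance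

-- ===== CLAIM (what is proved, stated in full; the proofs are below) =====
def Claim_equal_parse_asp_to_steps : Prop := ∀ (asp_content : String), Dom_parse_asp_to_steps asp_content → Spec_parse_asp_to_steps asp_content (parse_asp_to_steps asp_content)

-- ===== LEMMAS AND PROOFS =====

-- A's finishing step (the final flush), as a function of the loop state
def pvFinishA (st : List (String × String) × Option (List Char) × List (List Char)) :
    List (String × String) :=
  match st.2.1 with
  | none => st.1
  | some ir => pvFlushA st.1 ir st.2.2

-- what A contributes from state (some ir, buf) followed by the remaining cleaned lines
def pvEmitCont (ir : List Char) (buf : List (List Char)) (lines : List (List Char)) :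
    List (String × String) :=
  let body := buf ++ lines.takeWhile (fun l => !pvIsHdr l)
  (if body.isEmpty then []
   else [(String.ofList ir, String.ofList (PySem.Chars.join ['\n'] body))]) ++
    pvEmit (lines.dropWhile (fun l => !pvIsHdr l))

theorem pvEmit_nil : pvEmit [] = [] := by rw [pvEmit.eq_def]

theorem pvEmit_cons (h : List Char) (rest : List (List Char)) : pvEmit (h :: rest) =
    (if (rest.takeWhile (fun l => !pvIsHdr l)).isEmpty then []
     else [(String.ofList (pvStripHeader h),
            String.ofList (PySem.Chars.join ['\n'] (rest.takeWhile (fun l => !pvIsHdr l))))]) ++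
      pvEmit (rest.dropWhile (fun l => !pvIsHdr l)) := by
  rw [pvEmit.eq_def]

-- "no surrounding whitespace": non-empty with non-space first and last char
def pvNS (l : List Char) : Prop :=
  l ≠ [] ∧ (∀ a, l.head? = some a → PySem.Chars.isspace a = false)
        ∧ (∀ b, l.getLast? = some b → PySem.Chars.isspace b = false)

theorem pvDropWhile_head?_false {α : Type} (p : α → Bool) (l : List α) (a : α)
    (h : (l.dropWhile p).head? = some a) : p a = false := by
  induction l with
  | nil => simp at h
  | cons b t ih =>
    by_cases hb : p b = true
    · rw [List.dropWhile_cons_of_pos hb] at h; exact ih h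
    · rw [List.dropWhile_cons_of_neg hb] at h
      simp at h; subst h
      simpa using hb

theorem pvHead?_of_prefix {α : Type} {l1 l2 : List α} (h : l1 <+: l2) (hne : l1 ≠ []) :
    l1.head? = l2.head? := by
  obtain ⟨r, rfl⟩ := h
  exact (List.head?_append_of_ne_nil l1 hne).symm

theorem pvLstrip_eq_self (l : List Char)
    (h : ∀ a, l.head? = some a → PySem.Chars.isspace a = false) :
    PySem.Chars.lstrip l = l := by
  cases l with
  | nil => rfl
  | cons a t =>
    unfold PySem.Chars.lstrip
    rw [List.dropWhile_cons_of_neg (by simp [h a rfl])]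

theorem pvRstrip_eq_self (l : List Char)
    (h : ∀ b, l.getLast? = some b → PySem.Chars.isspace b = false) :
    PySem.Chars.rstrip l = l := by
  have h' : PySem.Chars.lstrip l.reverse = l.reverse :=
    pvLstrip_eq_self l.reverse (by
      intro a ha
      exact h a (by rwa [List.head?_reverse] at ha))
  unfold PySem.Chars.rstrip
  unfold PySem.Chars.lstrip at h'
  rw [h', List.reverse_reverse]

theorem pvStrip_eq_self (l : List Char) (h : pvNS l) : PySem.Chars.strip l = l := by
  obtain ⟨-, h1, h2⟩ := h
  unfold PySem.Chars.strip
  rw [pvLstrip_eq_self l h1, pvRstrip_eq_self l h2]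

theorem pvNS_strip (raw : List Char) (h : PySem.Chars.strip raw ≠ []) :
    pvNS (PySem.Chars.strip raw) := by
  have hz : PySem.Chars.strip raw =
      (List.dropWhile PySem.Chars.isspace (PySem.Chars.lstrip raw).reverse).reverse := rfl
  refine ⟨h, ?_, ?_⟩
  · intro a ha
    have hpre : PySem.Chars.strip raw <+: PySem.Chars.lstrip raw := by
      have h1 := List.reverse_prefix.mpr
        (List.dropWhile_suffix (l := (PySem.Chars.lstrip raw).reverse) PySem.Chars.isspace)
      rw [List.reverse_reverse] at h1
      rw [hz]; exact h1
    rw [pvHead?_of_prefix hpre h] at ha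
    exact pvDropWhile_head?_false PySem.Chars.isspace raw a ha
  · intro b hb
    rw [hz, List.getLast?_reverse] at hb
    exact pvDropWhile_head?_false PySem.Chars.isspace _ b hb

theorem pvNS_join (buf : List (List Char)) (hne : buf ≠ [])
    (h : ∀ l ∈ buf, pvNS l) : pvNS (PySem.Chars.join ['\n'] buf) := by
  induction buf with
  | nil => exact absurd rfl hne
  | cons x rest ih =>
    have hx := h x (by simp)
    cases rest with
    | nil =>
      rw [PySem.Chars.join_singleton]
      exact hx
    | cons y t =>
      rw [PySem.Chars.join_cons_cons, List.append_assoc]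
      have hrest := ih (by simp) (fun l hl => h l (by simp [hl]))
      obtain ⟨hx1, hx2, hx3⟩ := hx
      obtain ⟨hr1, hr2, hr3⟩ := hrest
      refine ⟨by simp [hx1], ?_, ?_⟩
      · intro a ha
        rw [List.head?_append_of_ne_nil _ hx1] at ha
        exact hx2 a ha
      · intro b hb
        rw [List.getLast?_append_of_ne_nil (l₂ := ['\n'] ++ PySem.Chars.join ['\n'] (y :: t))
              x (by simp),
            List.getLast?_append_of_ne_nil (l₂ := PySem.Chars.join ['\n'] (y :: t))
              ['\n'] hr1] at hb
        exact hr3 b hb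

-- A's flush, written without re-stripping, on a buffer of clean lines
theorem pvFlushA_eq (steps : List (String × String)) (ir : List Char)
    (buf : List (List Char)) (h : ∀ l ∈ buf, pvNS l) :
    pvFlushA steps ir buf = steps ++
      (if buf.isEmpty then []
       else [(String.ofList ir, String.ofList (PySem.Chars.join ['\n'] buf))]) := by
  cases hb : buf with
  | nil =>
    simp [pvFlushA, PySem.Chars.join_nil, PySem.Chars.strip, PySem.Chars.lstrip,
      PySem.Chars.rstrip]
  | cons x t =>
    have hjoin : pvNS (PySem.Chars.join ['\n'] buf) :=
      pvNS_join buf (by simp [hb]) h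
    rw [← hb]
    simp only [pvFlushA, pvStrip_eq_self _ hjoin]
    rw [if_neg hjoin.1]
    simp [hb]

-- running A from an open section over clean lines yields that section plus the descent
theorem pvRunSome (lines : List (List Char)) :
    ∀ (steps : List (String × String)) (ir : List Char) (buf : List (List Char)),
      (∀ l ∈ lines, pvNS l) → (∀ l ∈ buf, pvNS l) →
      pvFinishA (lines.foldl pvStepA (steps, some ir, buf)) =
        steps ++ pvEmitCont ir buf lines := by
  induction lines with
  | nil =>
    intro steps ir buf _ hbuf
    simp only [List.foldl_nil, pvFinishA, pvEmitCont, List.takeWhile_nil,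
      List.dropWhile_nil, List.append_nil, pvEmit_nil]
    exact pvFlushA_eq steps ir buf hbuf
  | cons l rest ih =>
    intro steps ir buf hlines hbuf
    have hl : pvNS l := hlines l (by simp)
    have hrest : ∀ x ∈ rest, pvNS x := fun x hx => hlines x (by simp [hx])
    have hstripl : PySem.Chars.strip l = l := pvStrip_eq_self l hl
    by_cases hh : pvIsHdr l = true
    · have hstep : pvStepA (steps, some ir, buf) l =
          (pvFlushA steps ir buf, some (pvStripHeader l), []) := by
        simp only [pvStepA, hstripl]
        rw [if_neg hl.1, if_pos (by simpa [pvIsHdr] using hh)]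
      -- the step flushes; the descent opens a fresh block at l
      rw [List.foldl_cons, hstep, ih _ _ _ hrest (by simp),
        pvFlushA_eq steps ir buf hbuf]
      simp [pvEmitCont, hh, pvEmit_cons, List.append_assoc]
    · have hstep : pvStepA (steps, some ir, buf) l = (steps, some ir, buf ++ [l]) := by
        simp only [pvStepA, hstripl]
        rw [if_neg hl.1, if_neg (by simpa [pvIsHdr] using hh)]
      have hbuf' : ∀ x ∈ buf ++ [l], pvNS x := by
        intro x hx
        rcases List.mem_append.mp hx with hx | hx
        · exact hbuf x hx
        · simp at hx; subst hx; exact hl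
      rw [List.foldl_cons, hstep, ih _ _ _ hrest hbuf']
      simp [pvEmitCont, hh, List.append_assoc]

-- running A before any header over clean lines just skips the pre-header prefix
theorem pvRunNone (lines : List (List Char)) :
    ∀ (steps : List (String × String)) (buf : List (List Char)),
      (∀ l ∈ lines, pvNS l) →
      pvFinishA (lines.foldl pvStepA (steps, none, buf)) =
        steps ++ pvEmit (lines.dropWhile (fun l => !pvIsHdr l)) := by
  induction lines with
  | nil =>
    intro steps buf _
    simp [pvFinishA, pvEmit_nil]
  | cons l rest ih =>
    intro steps buf hlines
    have hl : pvNS l := hlines l (by simp)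
    have hrest : ∀ x ∈ rest, pvNS x := fun x hx => hlines x (by simp [hx])
    have hstripl : PySem.Chars.strip l = l := pvStrip_eq_self l hl
    by_cases hh : pvIsHdr l = true
    · have hstep : pvStepA (steps, none, buf) l =
          (steps, some (pvStripHeader l), []) := by
        simp only [pvStepA, hstripl]
        rw [if_neg hl.1, if_pos (by simpa [pvIsHdr] using hh)]
      rw [List.foldl_cons, hstep, pvRunSome rest steps _ [] hrest (by simp)]
      simp [pvEmitCont, hh, pvEmit_cons]
    · have hstep : pvStepA (steps, none, buf) l = (steps, none, buf ++ [l]) := by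
        simp only [pvStepA, hstripl]
        rw [if_neg hl.1, if_neg (by simpa [pvIsHdr] using hh)]
      rw [List.foldl_cons, hstep, ih _ _ hrest]
      simp [hh]

-- folding A over the raw lines equals folding it over the cleaned lines
theorem pvFold_cleaned (raws : List (List Char)) :
    ∀ st, raws.foldl pvStepA st =
      ((raws.map PySem.Chars.strip).filter (fun l => !l.isEmpty)).foldl pvStepA st := by
  induction raws with
  | nil => intro st; rfl
  | cons raw rest ih =>
    intro st
    by_cases h0 : PySem.Chars.strip raw = []
    · have hskip : pvStepA st raw = st := by simp [pvStepA, h0]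
      simp only [List.foldl_cons, hskip, List.map_cons, h0, List.filter_cons,
        List.isEmpty_nil]
      exact ih st
    · have hsame : pvStepA st raw = pvStepA st (PySem.Chars.strip raw) := by
        have : PySem.Chars.strip (PySem.Chars.strip raw) = PySem.Chars.strip raw :=
          pvStrip_eq_self _ (pvNS_strip raw h0)
        simp [pvStepA, this]
      simp only [List.foldl_cons, List.map_cons, List.filter_cons,
        List.isEmpty_eq_false_iff.mpr h0, Bool.not_false, hsame]
      exact ih _

theorem pvCleaned_NS (s : String) : ∀ l ∈ pvCleaned s, pvNS l := by
  intro l hl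
  simp only [pvCleaned, List.mem_filter, List.mem_map] at hl
  obtain ⟨⟨raw, _, rfl⟩, hne⟩ := hl
  exact pvNS_strip raw (by simpa using hne)

-- ===== VERDICT (by name: the statement is the Claim_ definition above) =====
theorem parse_asp_to_steps_spec : Claim_equal_parse_asp_to_steps := by
  intro s _
  unfold Spec_parse_asp_to_steps parse_asp_to_steps parse_asp_to_steps_alt
  have h1 := pvFold_cleaned (PySem.Chars.splitlines s.toList) ([], none, [])
  have h2 := pvRunNone (pvCleaned s) [] [] (pvCleaned_NS s)
  simp only [pvFinishA] at h2
  simp only [pvCleaned] at h1 h2 ⊢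
  rw [h1, h2]
  simp
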